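-- pv_equiv track=rewrite | github.com/eliasnijs/hangman-web | cgi-bin/hang.py | check
-- ===== SOURCE A (Python) =====
-- def check(w1, w2, w3):
--     word = w1
--     pattern = w2
--     letters_used = w3 + "_"
--
--     if len(word) != len(pattern):
--         return False
--
--     for index, character in enumerate(pattern):
--         if character not in letters_used:
--             return False
--         if character not in ('_', word[index]):
--             return False
--
--     for index, character in enumerate(word):
--         if character in letters_used and character not in pattern:
--             return False
--
--     for index, character in enumerate(letters_used):
--         if character in word:
--             for i, c in enumerate(word):
--                 if c == character and pattern[i] != c:
--                     return False
--
--     return True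
-- ===== SOURCE B (Python) =====
-- def check(w1, w2, w3):
--     # Reconstruct the canonical pattern from the word and the guessed letters,
--     # then compare it with the given pattern (single pass instead of A's four passes).
--     if len(w1) != len(w2):
--         return False
--     allowed = set(w3)
--     allowed.add("_")
--     return w2 == "".join(c if c in allowed else "_" for c in w1)
-- ===== Notes on version B (the rewrite author's own statement) =====
-- stated objective: simpler
-- what changed: Replaces A's four validation passes (including a nested loop over letters_used x word with repeated substring membership tests) with a single pass that reconstructs the canonical expected pattern from the word and the guessed-letter set and compares it to the given pattern.
import Mathlib
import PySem

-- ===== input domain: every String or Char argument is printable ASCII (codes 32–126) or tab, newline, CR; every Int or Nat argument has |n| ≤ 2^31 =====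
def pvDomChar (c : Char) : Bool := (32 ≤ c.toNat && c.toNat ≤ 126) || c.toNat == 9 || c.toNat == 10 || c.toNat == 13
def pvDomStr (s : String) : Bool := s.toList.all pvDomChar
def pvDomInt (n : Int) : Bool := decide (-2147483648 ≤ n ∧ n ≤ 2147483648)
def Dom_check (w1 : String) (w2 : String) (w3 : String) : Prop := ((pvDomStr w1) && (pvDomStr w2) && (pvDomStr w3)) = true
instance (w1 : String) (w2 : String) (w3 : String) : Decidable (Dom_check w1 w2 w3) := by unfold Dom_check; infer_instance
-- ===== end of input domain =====

-- B replaces A's four validation passes (one of them a nested double loop) by a single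
-- reconstruct-then-compare pass; objective: simpler.

-- ===== PORT A =====
-- Indexing `word[index]` / `pattern[i]` is ported with pyGetD: after the length check every
-- index produced by enumerate is in range for both lists, so the default is never used (exact).
def check (w1 : String) (w2 : String) (w3 : String) : Bool :=
  let word := w1.toList
  let pattern := w2.toList
  let letters_used := w3.toList ++ ['_']
  if word.length ≠ pattern.length then false
  else
    -- first loop: early-return False unless every pattern character passes both tests
    ((PySem.List.enumerate pattern).all (fun ic =>
        decide (ic.2 ∈ letters_used) &&
        (ic.2 == '_' || ic.2 == PySem.List.pyGetD word ic.1 ' ')) &&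
     -- second loop
     ((PySem.List.enumerate word).all (fun ic =>
        !(decide (ic.2 ∈ letters_used) && !decide (ic.2 ∈ pattern))) &&
      -- third loop with its nested inner loop
      (PySem.List.enumerate letters_used).all (fun ic =>
        if ic.2 ∈ word then
          (PySem.List.enumerate word).all (fun jc =>
            !(jc.2 == ic.2 && !(PySem.List.pyGetD pattern jc.1 ' ' == jc.2)))
        else true)))

-- ===== PORT B =====
def check_alt (w1 : String) (w2 : String) (w3 : String) : Bool :=
  if w1.toList.length ≠ w2.toList.length then false
  else
    let allowed := PySem.Set.add (PySem.Set.ofList w3.toList) '_'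
    w2.toList == w1.toList.map (fun c => if allowed.contains c then c else '_')

-- ===== PRECONDITION & SPEC =====
def Spec_check (w1 : String) (w2 : String) (w3 : String) (out : Bool) : Prop := out = check_alt w1 w2 w3
instance (w1 : String) (w2 : String) (w3 : String) (out : Bool) : Decidable (Spec_check w1 w2 w3 out) := by unfold Spec_check; infer_instance

-- ===== CLAIM (what is proved, stated in full; the proofs are below) =====
def Claim_equal_check : Prop := ∀ (w1 : String) (w2 : String) (w3 : String), Dom_check w1 w2 w3 → Spec_check w1 w2 w3 (check w1 w2 w3)

-- ===== LEMMAS AND PROOFS =====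

-- The core fact: with '_' ∈ lu and equal lengths, A's three loop conditions hold iff the
-- pattern is exactly the canonical pattern B reconstructs.
lemma loops_iff_canonical (word p lu : List Char) (hlen : word.length = p.length)
    (hu : '_' ∈ lu) :
    ((∀ k (h : k < p.length), p[k] ∈ lu ∧ (p[k] = '_' ∨ p[k] = word.getD k ' ')) ∧
     (∀ k (h : k < word.length), word[k] ∈ lu → word[k] ∈ p) ∧
     (∀ c, c ∈ lu → c ∈ word →
        ∀ j (h : j < word.length), word[j] = c → p.getD j ' ' = c))
    ↔ p = word.map (fun c => if c ∈ lu then c else '_') := by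
  constructor
  · rintro ⟨h1, _h2, h3⟩
    apply List.ext_getElem
    · simp [hlen.symm]
    · intro i hi hi'
      have hiw : i < word.length := by simpa [hlen] using hi
      simp only [List.getElem_map]
      by_cases hm : word[i] ∈ lu
      · have := h3 word[i] hm (List.getElem_mem hiw) i hiw rfl
        have hg : p.getD i ' ' = p[i] := List.getD_eq_getElem p ' ' hi
        have hpi : p[i] = word[i] := by rw [← hg, this]
        rw [if_pos hm, hpi]
      · rcases h1 i hi with ⟨hin, hcase⟩
        rcases hcase with h | h
        · simp [hm, h]
        · exfalso
          have hg : word.getD i ' ' = word[i] := List.getD_eq_getElem word ' ' hiw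
          rw [hg] at h
          exact hm (h ▸ hin)
  · intro hp
    subst hp
    refine ⟨?_, ?_, ?_⟩
    · intro k hk
      have hkw : k < word.length := by simpa using hk
      have hg : word.getD k ' ' = word[k] := List.getD_eq_getElem word ' ' hkw
      simp only [List.getElem_map]
      by_cases hm : word[k] ∈ lu
      · rw [if_pos hm]
        exact ⟨hm, Or.inr hg.symm⟩
      · rw [if_neg hm]
        exact ⟨hu, Or.inl rfl⟩
    · intro k hk hm
      have : word[k] = (word.map (fun c => if c ∈ lu then c else '_'))[k]'(by simpa using hk) := by
        simp [hm]
      rw [this]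
      exact List.getElem_mem _
    · intro c _hc hcw j hj hwj
      have hjp : j < (word.map (fun c => if c ∈ lu then c else '_')).length := by simpa using hj
      rw [List.getD_eq_getElem _ ' ' hjp]
      have hm : c ∈ lu := _hc
      simp [hwj, hm]

theorem check_spec_aux (w1 w2 w3 : String) : check w1 w2 w3 = check_alt w1 w2 w3 := by
  unfold check check_alt
  by_cases hlen : w1.toList.length = w2.toList.length
  · simp only [hlen, ne_eq, not_true_eq_false, if_false]
    set word := w1.toList
    set p := w2.toList
    set lu := w3.toList ++ ['_'] with hlu
    have hu : '_' ∈ lu := by simp [hlu]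
    have key := loops_iff_canonical word p lu hlen hu
    have hmemset : ∀ c : Char,
        ((PySem.Set.add (PySem.Set.ofList w3.toList) '_').contains c = true) ↔ c ∈ lu := by
      intro c
      simp [pysem, hlu]
    have hmap : (word.map (fun c =>
        if (PySem.Set.add (PySem.Set.ofList w3.toList) '_').contains c then c else '_')) =
        word.map (fun c => if c ∈ lu then c else '_') := by
      apply List.map_congr_left
      intro c _
      by_cases h : c ∈ lu
      · rw [if_pos ((hmemset c).2 h), if_pos h]
      · rw [if_neg (fun hc => h ((hmemset c).1 hc)), if_neg h]
    rw [hmap]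
    rcases Bool.eq_false_or_eq_true (p == word.map (fun c => if c ∈ lu then c else '_')) with hb | hb
    all_goals rw [hb]
    · -- RHS true: the pattern IS canonical, so every loop check passes
      have hpc : p = word.map (fun c => if c ∈ lu then c else '_') := by
        simpa using hb
      obtain ⟨h1, h2, h3⟩ := key.mpr hpc
      simp only [Bool.and_eq_true, List.all_eq_true]
      refine ⟨?_, ?_, ?_⟩
      · intro x hx
        obtain ⟨k, hk, rfl⟩ := (PySem.List.mem_enumerate_iff _ _ _).mp hx
        rcases h1 k hk with ⟨hin, hcase⟩
        simp only [zero_add, PySem.List.pyGetD_natCast, Bool.or_eq_true,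
          beq_iff_eq, decide_eq_true_eq]
        exact ⟨hin, hcase⟩
      · intro x hx
        obtain ⟨k, hk, rfl⟩ := (PySem.List.mem_enumerate_iff _ _ _).mp hx
        by_cases hm : word[k] ∈ lu
        · simp [hm, h2 k hk hm]
        · simp [hm]
      · intro x hx
        obtain ⟨k, hk, rfl⟩ := (PySem.List.mem_enumerate_iff _ _ _).mp hx
        by_cases hcw : lu[k] ∈ word
        · simp only [hcw, if_true, List.all_eq_true]
          intro y hy
          obtain ⟨j, hj, rfl⟩ := (PySem.List.mem_enumerate_iff _ _ _).mp hy
          by_cases hwj : word[j] = lu[k]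
          · have := h3 lu[k] (List.getElem_mem hk) hcw j hj hwj
            have hjp : j < p.length := by omega
            rw [List.getD_eq_getElem p ' ' hjp] at this
            simp [hwj, List.getElem?_eq_getElem hjp, this]
          · simp [hwj]
        · simp [hcw]
    · -- RHS false: the loops cannot all hold
      have hne : p ≠ word.map (fun c => if c ∈ lu then c else '_') := by
        simpa using hb
      rw [Bool.eq_false_iff]
      intro hA
      simp only [Bool.and_eq_true, List.all_eq_true] at hA
      obtain ⟨hL1, hL2, hL3⟩ := hA
      apply hne
      apply key.mp
      refine ⟨?_, ?_, ?_⟩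
      · intro k hk
        have := hL1 ((0 : Int) + k, p[k]) ((PySem.List.mem_enumerate_iff _ _ _).mpr ⟨k, hk, rfl⟩)
        simp only [zero_add, PySem.List.pyGetD_natCast, Bool.or_eq_true,
          beq_iff_eq, decide_eq_true_eq] at this
        exact this
      · intro k hk hm
        have := hL2 ((0 : Int) + k, word[k]) ((PySem.List.mem_enumerate_iff _ _ _).mpr ⟨k, hk, rfl⟩)
        simp only [Bool.not_eq_true', Bool.and_eq_false_iff, Bool.not_eq_false',
          decide_eq_true_eq, decide_eq_false_iff_not] at this
        rcases this with h | h
        · exact absurd hm (by simpa using h)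
        · simpa using h
      · intro c hc hcw j hj hwj
        obtain ⟨k, hk, hck⟩ := List.mem_iff_getElem.mp hc
        have := hL3 ((0 : Int) + k, lu[k]) ((PySem.List.mem_enumerate_iff _ _ _).mpr ⟨k, hk, rfl⟩)
        rw [hck] at this
        simp only [hcw, if_true, List.all_eq_true] at this
        have h2 := this ((0 : Int) + j, word[j]) ((PySem.List.mem_enumerate_iff _ _ _).mpr ⟨j, hj, rfl⟩)
        simp only [zero_add, PySem.List.pyGetD_natCast, Bool.not_eq_true',
          Bool.and_eq_false_iff, Bool.not_eq_false', beq_iff_eq, beq_eq_false_iff_ne, ne_eq] at h2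
        rcases h2 with h | h
        · exact absurd hwj h
        · exact hwj ▸ h
  · simp only [ne_eq, hlen, not_false_eq_true, if_true]

-- ===== VERDICT (by name: the statement is the Claim_ definition above) =====
theorem check_spec : Claim_equal_check := by
  intro w1 w2 w3 _
  unfold Spec_check
  exact check_spec_aux w1 w2 w3
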